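-- pv_equiv track=rewrite | github.com/SmartCouplersMG/CimentacionesSuperficiales | parser.py | _find_tables_by_contains
-- ===== SOURCE A (Python) =====
-- def _find_tables_by_contains(T, substrings):
--     """
--     Retorna lista de nombres de tablas cuyo nombre contiene
--     cualquiera de los fragmentos dados (case-insensitive).
--     """
--     out = []
--     subs = [s.upper() for s in substrings]
--     for name in T.keys():
--         uname = name.upper()
--         if any(s in uname for s in subs):
--             out.append(name)
--     return out
-- ===== SOURCE B (Python) =====
-- def _find_tables_by_contains(T, substrings):
--     """Substring-outer passes over a shrinking list of unmatched (name, NAME) pairs,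
--     collecting matches into a set; then emit matched keys in dict order."""
--     matched = set()
--     remaining = [(name, name.upper()) for name in T.keys()]
--     for s in substrings:
--         su = s.upper()
--         still = []
--         add = matched.add
--         keep = still.append
--         for item in remaining:
--             if su in item[1]:
--                 add(item[0])
--             else:
--                 keep(item)
--         remaining = still
--     return [name for name in T.keys() if name in matched]
-- ===== Notes on version B (the rewrite author's own statement) =====
-- stated objective: alternative
-- what changed: Inverts the loop nesting: B makes one pass per substring over a shrinking list of not-yet-matched (name, uppercased-name) pairs, collecting matched names into a set, then emits the keys in dict order that are in the set, instead of A's per-name any()-over-all-substrings scan.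
import Mathlib
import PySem

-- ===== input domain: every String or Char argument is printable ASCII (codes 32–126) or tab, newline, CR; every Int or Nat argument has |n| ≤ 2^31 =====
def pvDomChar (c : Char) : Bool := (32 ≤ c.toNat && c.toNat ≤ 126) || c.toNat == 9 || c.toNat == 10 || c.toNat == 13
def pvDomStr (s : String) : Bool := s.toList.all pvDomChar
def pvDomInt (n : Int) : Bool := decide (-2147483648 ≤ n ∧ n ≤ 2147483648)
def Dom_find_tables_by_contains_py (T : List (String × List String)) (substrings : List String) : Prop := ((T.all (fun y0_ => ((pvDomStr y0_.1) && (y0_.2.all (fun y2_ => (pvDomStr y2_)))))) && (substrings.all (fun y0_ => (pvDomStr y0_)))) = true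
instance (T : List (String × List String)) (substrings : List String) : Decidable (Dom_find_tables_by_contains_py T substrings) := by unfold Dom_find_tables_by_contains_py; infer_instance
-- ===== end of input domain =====

-- B inverts the loop nesting: one pass per substring over a shrinking list of not-yet-matched
-- (name, uppercased-name) pairs collecting matched names into a set, then one key-order pass
-- emitting them; objective: alternative (same worst-case cost).

-- ===== PORT A =====
-- name-outer loop: for each key, any(s in uname for s in subs)
def find_tables_by_contains_py (T : List (String × List String)) (substrings : List String) : List String :=
  let subs := substrings.map (fun s => PySem.Str.upper s)
  T.foldl (fun out p =>
    let uname := PySem.Str.upper p.1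
    if subs.any (fun s => PySem.Str.isIn s uname) then out ++ [p.1] else out) []

-- ===== PORT B =====
def find_tables_by_contains_py_alt (T : List (String × List String)) (substrings : List String) : List String :=
  let init := T.map (fun p => (p.1, PySem.Str.upper p.1))
  let st := substrings.foldl (fun (st : PySem.Set String × List (String × String)) s =>
    let su := PySem.Str.upper s
    st.2.foldl (fun ac q =>
      if PySem.Str.isIn su q.2 then (PySem.Set.add ac.1 q.1, ac.2)
      else (ac.1, ac.2 ++ [q])) (st.1, ([] : List (String × String)))) (PySem.Set.empty, init)
  (T.map (fun p => p.1)).filter (fun name => PySem.Set.contains st.1 name)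

-- ===== PRECONDITION & SPEC =====
def Spec_find_tables_by_contains_py (T : List (String × List String)) (substrings : List String) (out : List String) : Prop := out = find_tables_by_contains_py_alt T substrings
instance (T : List (String × List String)) (substrings : List String) (out : List String) : Decidable (Spec_find_tables_by_contains_py T substrings out) := by unfold Spec_find_tables_by_contains_py; infer_instance

-- ===== CLAIM (what is proved, stated in full; the proofs are below) =====
def Claim_equal_find_tables_by_contains_py : Prop := ∀ (T : List (String × List String)) (substrings : List String), Dom_find_tables_by_contains_py T substrings → Spec_find_tables_by_contains_py T substrings (find_tables_by_contains_py T substrings)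

-- ===== LEMMAS AND PROOFS =====

-- B's inner pass (one substring over the remaining pairs) splits into matched adds and the kept rest
lemma inner_eq (su : String) (rem : List (String × String)) (m : PySem.Set String) (acc : List (String × String)) :
    rem.foldl (fun ac q =>
      if PySem.Str.isIn su q.2 then (PySem.Set.add ac.1 q.1, ac.2)
      else (ac.1, ac.2 ++ [q])) (m, acc) =
    (rem.foldl (fun m q => if PySem.Str.isIn su q.2 then PySem.Set.add m q.1 else m) m,
     acc ++ rem.filter (fun q => !PySem.Str.isIn su q.2)) := by
  induction rem generalizing m acc with
  | nil => simp
  | cons q rem ih =>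
    simp only [List.foldl_cons]
    by_cases h : PySem.Str.isIn su q.2 = true
    · simp only [if_pos h]
      rw [ih, List.filter_cons_of_neg (by rw [h]; decide)]
    · have h' := eq_false_of_ne_true h
      simp only [if_neg h]
      rw [ih, List.filter_cons_of_pos (by rw [h']; decide)]
      simp [List.append_assoc]

-- membership after the matched-adding fold of one pass
lemma mem_add_fold (su : String) (rem : List (String × String)) (m : PySem.Set String) (x : String) :
    x ∈ rem.foldl (fun m q => if PySem.Str.isIn su q.2 then PySem.Set.add m q.1 else m) m ↔
    x ∈ m ∨ ∃ q ∈ rem, q.1 = x ∧ PySem.Str.isIn su q.2 = true := by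
  induction rem generalizing m with
  | nil => simp
  | cons q rem ih =>
    simp only [List.foldl_cons, List.mem_cons]
    by_cases h : PySem.Str.isIn su q.2 = true
    · rw [if_pos h, ih]
      simp only [PySem.Set.mem_add]
      constructor
      · rintro ((hm | rfl) | ⟨r, hr, rfl, hs⟩)
        · exact Or.inl hm
        · exact Or.inr ⟨q, Or.inl rfl, rfl, h⟩
        · exact Or.inr ⟨r, Or.inr hr, rfl, hs⟩
      · rintro (hm | ⟨r, (rfl | hr), rfl, hs⟩)
        · exact Or.inl (Or.inl hm)
        · exact Or.inl (Or.inr rfl)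
        · exact Or.inr ⟨r, hr, rfl, hs⟩
    · rw [if_neg h, ih]
      constructor
      · rintro (hm | ⟨r, hr, rfl, hs⟩)
        · exact Or.inl hm
        · exact Or.inr ⟨r, Or.inr hr, rfl, hs⟩
      · rintro (hm | ⟨r, (rfl | hr), rfl, hs⟩)
        · exact Or.inl hm
        · exact (h hs).elim
        · exact Or.inr ⟨r, hr, rfl, hs⟩

-- membership in B's matched set after the whole substring-outer loop
lemma mem_matched (ss : List String) (m : PySem.Set String) (rem : List (String × String)) (x : String) :
    x ∈ (ss.foldl (fun (st : PySem.Set String × List (String × String)) s =>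
      st.2.foldl (fun ac q =>
        if PySem.Str.isIn (PySem.Str.upper s) q.2 then (PySem.Set.add ac.1 q.1, ac.2)
        else (ac.1, ac.2 ++ [q])) (st.1, ([] : List (String × String)))) (m, rem)).1 ↔
    x ∈ m ∨ ∃ q ∈ rem, q.1 = x ∧ ∃ s ∈ ss, PySem.Str.isIn (PySem.Str.upper s) q.2 = true := by
  induction ss generalizing m rem with
  | nil => simp
  | cons s ss ih =>
    simp only [List.foldl_cons, List.mem_cons]
    rw [inner_eq, ih, mem_add_fold]
    constructor
    · rintro ((hm | ⟨q, hq, rfl, hs⟩) | ⟨q, hq, rfl, t, ht, hs⟩)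
      · exact Or.inl hm
      · exact Or.inr ⟨q, hq, rfl, s, Or.inl rfl, hs⟩
      · rw [List.nil_append, List.mem_filter] at hq
        exact Or.inr ⟨q, hq.1, rfl, t, Or.inr ht, hs⟩
    · rintro (hm | ⟨q, hq, rfl, t, (rfl | ht), hs⟩)
      · exact Or.inl (Or.inl hm)
      · exact Or.inl (Or.inr ⟨q, hq, rfl, hs⟩)
      · by_cases h : PySem.Str.isIn (PySem.Str.upper s) q.2 = true
        · exact Or.inl (Or.inr ⟨q, hq, rfl, h⟩)
        · refine Or.inr ⟨q, ?_, rfl, t, ht, hs⟩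
          rw [List.nil_append, List.mem_filter]
          exact ⟨hq, by rw [eq_false_of_ne_true h]; decide⟩

theorem find_tables_by_contains_py_eq (T : List (String × List String)) (substrings : List String) :
    find_tables_by_contains_py T substrings = find_tables_by_contains_py_alt T substrings := by
  unfold find_tables_by_contains_py find_tables_by_contains_py_alt
  dsimp only
  rw [PySem.List.foldl_append_if
    (p := fun p : String × List String => (substrings.map (fun s => PySem.Str.upper s)).any
      (fun s => PySem.Str.isIn s (PySem.Str.upper p.1)))
    (f := fun p => p.1)]
  rw [List.nil_append, List.filter_map]
  refine congrArg (List.map fun p : String × List String => p.1) (List.filter_congr ?_)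
  intro p hp
  simp only [Function.comp_apply]
  rw [Bool.eq_iff_iff, List.any_eq_true, PySem.Set.contains_iff, mem_matched]
  simp only [PySem.Set.empty, List.not_mem_nil, false_or, List.mem_map]
  constructor
  · rintro ⟨_, ⟨s, hs, rfl⟩, h⟩
    exact ⟨(p.1, PySem.Str.upper p.1), ⟨p, hp, rfl⟩, rfl, s, hs, h⟩
  · rintro ⟨q, ⟨r, hr, rfl⟩, hq1, s, hs, h⟩
    exact ⟨_, ⟨s, hs, rfl⟩, by rw [← hq1]; exact h⟩

-- ===== VERDICT (by name: the statement is the Claim_ definition above) =====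
theorem find_tables_by_contains_py_spec : Claim_equal_find_tables_by_contains_py := by
  intro T substrings _
  unfold Spec_find_tables_by_contains_py
  exact find_tables_by_contains_py_eq T substrings
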